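-- pv_equiv track=rewrite | github.com/user202729/fxesplus | brief_match.py | process
-- ===== SOURCE A (Python) =====
-- def find_sublist(a,b):
-- 	for i in range(len(b)-len(a)+1):
-- 		if all(a[j]==b[i+j] for j in range(len(a))):
-- 			return i
-- 	return -1
--
-- def process(l1num,l1,l2num,l2):
-- 	result=[]  # list of (line index 1, number of lines, line index 2)
-- 	last_end=0
-- 	for i in range(len(l1)):
-- 		end=max(last_end,i)
-- 		while end!=len(l1):
-- 			index=find_sublist(l1[i:end+1],l2)
-- 			if index<0:
-- 				break
-- 			good_index=index
-- 			while end!=len(l1) and l1[end]==l2[index-i+end]: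
-- 				end+=1
-- 		if end>last_end:
-- 			last_end=end
-- 			if find_sublist(l1[i:end],l2[good_index+1:])<0:
-- 				# unique appearance
-- 				result.append((i,end-i,good_index))
-- 	return result
-- ===== SOURCE B (Python) =====
-- def process(l1num, l1, l2num, l2):
--     # Two-pass O(n*m) dynamic programming instead of repeated find_sublist scans.
--     n = len(l1); m = len(l2)
--     # Pass 1 (i descending): row[j] = length of longest common prefix of l1[i:] and l2[j:];
--     # per i record (best, first, cnt) = (max match length, first j attaining it, how many j attain it).
--     info = []
--     row = [0] * (m + 1)
--     for i in range(n - 1, -1, -1):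
--         row = [(row[j + 1] + 1 if l1[i] == l2[j] else 0) for j in range(m)] + [0]
--         best = 0; first = -1; cnt = 0
--         for j in range(m):
--             v = row[j]
--             if v > best:
--                 best = v; first = j; cnt = 1
--             elif v == best and v > 0:
--                 cnt += 1
--         info.append((best, first, cnt))
--     info.reverse()
--     # Pass 2 (i ascending): emit each new maximal block that occurs exactly once in l2.
--     result = []
--     last_end = 0
--     for i, (best, first, cnt) in enumerate(info):
--         f = i + best
--         if f > last_end:
--             if cnt == 1:
--                 result.append((i, best, first))
--             last_end = f
--     return result
-- ===== Notes on version B (the rewrite author's own statement) =====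
-- stated objective: alternative
-- what changed: B replaces A's repeated find_sublist rescans and match-extension while-loops by a two-pass longest-common-extension dynamic program: one backward O(n*m) pass builds lcp rows and records per start line the maximal match length, its first position in l2 and its occurrence count, and one forward pass emits the unique maximal blocks.
import Mathlib
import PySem

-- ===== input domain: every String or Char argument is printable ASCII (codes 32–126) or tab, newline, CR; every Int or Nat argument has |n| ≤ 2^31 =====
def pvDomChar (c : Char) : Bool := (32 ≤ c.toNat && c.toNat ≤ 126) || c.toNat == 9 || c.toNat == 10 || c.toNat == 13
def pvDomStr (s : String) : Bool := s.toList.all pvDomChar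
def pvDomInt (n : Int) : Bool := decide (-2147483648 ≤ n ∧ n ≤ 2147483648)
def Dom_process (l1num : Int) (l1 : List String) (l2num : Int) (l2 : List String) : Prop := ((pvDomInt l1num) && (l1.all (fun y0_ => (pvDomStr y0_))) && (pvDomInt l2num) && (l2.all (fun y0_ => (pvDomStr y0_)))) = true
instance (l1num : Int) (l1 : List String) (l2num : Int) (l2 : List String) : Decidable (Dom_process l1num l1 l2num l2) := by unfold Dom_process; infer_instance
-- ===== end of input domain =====

-- B replaces A's repeated find_sublist scans by a two-pass longest-common-extension DP (equal return values; A mutates nothing).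

-- ===== PORT A =====
-- 'all(a[j]==b[i+j] for j in range(len(a)))'
def fsCheck (a b : List String) (i : Int) : Bool :=
  (PySem.List.pyRange 0 (a.length : Int) 1).all
    (fun j => PySem.List.pyGet? a j == PySem.List.pyGet? b (i + j))

-- find_sublist: first i in range(len(b)-len(a)+1) passing the check, else -1
def find_sublist (a b : List String) : Int :=
  match (PySem.List.pyRange 0 ((b.length : Int) - (a.length : Int) + 1) 1).find? (fsCheck a b) with
  | some i => i
  | none => -1

-- inner 'while end!=len(l1) and l1[end]==l2[index-i+end]: end+=1'
-- (where Python raises IndexError — l2 index out of range, pyGet? = none — the loop stops; such inputs are outside Pre_)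
def extendA (l1 l2 : List String) (i index e : Int) : Int :=
  if _h : e ≠ (l1.length : Int) ∧ (PySem.List.pyGet? l1 e).isSome ∧
      PySem.List.pyGet? l1 e = PySem.List.pyGet? l2 (index - i + e) then
    extendA l1 l2 i index (e + 1)
  else e
termination_by ((l1.length : Int) + 1 - e).toNat
decreasing_by
  have hs := _h.2.1
  have : ¬ PySem.List.pyGet? l1 e = none := by
    intro hn; rw [hn] at hs; simp at hs
  rw [PySem.List.pyGet?_eq_none_iff] at this
  simp [PySem.Raise.InRange] at this
  omega

-- outer 'while end!=len(l1): index=find_sublist(...); if index<0: break; good_index=index; <extend>'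
-- (the 'if _h' bound check only makes the recursion total; it always holds when this is reached)
def whileA (l1 l2 : List String) (i e g : Int) : Int × Int :=
  if e = (l1.length : Int) then (e, g)
  else
    if find_sublist (PySem.List.slice l1 (some i) (some (e + 1))) l2 < 0 then (e, g)
    else
      if _h : e < extendA l1 l2 i (find_sublist (PySem.List.slice l1 (some i) (some (e + 1))) l2) e ∧
          extendA l1 l2 i (find_sublist (PySem.List.slice l1 (some i) (some (e + 1))) l2) e ≤ (l1.length : Int) then
        whileA l1 l2 i (extendA l1 l2 i (find_sublist (PySem.List.slice l1 (some i) (some (e + 1))) l2) e)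
          (find_sublist (PySem.List.slice l1 (some i) (some (e + 1))) l2)
      else (extendA l1 l2 i (find_sublist (PySem.List.slice l1 (some i) (some (e + 1))) l2) e,
            find_sublist (PySem.List.slice l1 (some i) (some (e + 1))) l2)
termination_by ((l1.length : Int) + 1 - e).toNat
decreasing_by omega

-- good_index starts as 0 here; Python leaves it unbound, and every input where A would
-- read it unbound (NameError) or index l2 out of range (IndexError) is outside Pre_.
def process (l1num : Int) (l1 : List String) (l2num : Int) (l2 : List String) : List (List Int) :=
  ((PySem.List.pyRange 0 (l1.length : Int) 1).foldl
    (fun (st : List (List Int) × Int × Int) i =>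
      let e0 := max st.2.1 i
      let p := whileA l1 l2 i e0 st.2.2
      if st.2.1 < p.1 then
        if find_sublist (PySem.List.slice l1 (some i) (some p.1))
            (PySem.List.slice l2 (some (p.2 + 1)) none) < 0 then
          (st.1 ++ [[i, p.1 - i, p.2]], p.1, p.2)
        else (st.1, p.1, p.2)
      else (st.1, st.2.1, p.2))
    ([], 0, 0)).1

-- ===== PORT B =====
def process_alt (l1num : Int) (l1 : List String) (l2num : Int) (l2 : List String) : List (List Int) :=
  let n : Int := l1.length
  let m : Int := l2.length
  -- pass 1: for i in range(n-1,-1,-1): row = [...]; scan row for (best, first, cnt); info.append(...)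
  let pass1 := ((PySem.List.pyRange 0 n 1).reverse).foldl
    (fun (st : List (Int × Int × Int) × List Int) i =>
      let row := ((PySem.List.pyRange 0 m 1).map (fun j =>
          if PySem.List.pyGet? l1 i == PySem.List.pyGet? l2 j then
            PySem.List.pyGetD st.2 (j + 1) 0 + 1
          else 0)) ++ [0]
      let t := (PySem.List.pyRange 0 m 1).foldl
        (fun (s : Int × Int × Int) j =>
          let v := PySem.List.pyGetD row j 0
          if s.1 < v then (v, j, 1)
          else if v = s.1 ∧ 0 < v then (s.1, s.2.1, s.2.2 + 1) else s)
        (0, -1, 0)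
      (st.1 ++ [t], row))
    ([], List.replicate (l2.length + 1) (0 : Int))
  let info := pass1.1.reverse
  -- pass 2: for i,(best,first,cnt) in enumerate(info): ...
  ((PySem.List.enumerate info).foldl
    (fun (st : List (List Int) × Int) p =>
      let f := p.1 + p.2.1
      if st.2 < f then
        (if p.2.2.2 = 1 then st.1 ++ [[p.1, p.2.1, p.2.2.1]] else st.1, f)
      else st)
    ([], 0)).1

-- ===== PRECONDITION & SPEC =====
-- longest common prefix length of two lists of lines (used by Pre_ and the proofs)
def lcp : List String → List String → Nat
  | a :: as, b :: bs => if a = b then lcp as bs + 1 else 0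
  | _, _ => 0

-- A reads the unbound good_index (NameError) exactly when the first two lines of l1 both miss l2.
def nameCond (l1 l2 : List String) : Bool :=
  match l1 with
  | a :: b :: _ => !(l2.contains a) && !(l2.contains b)
  | _ => false

-- A indexes l2 past its end (IndexError) when extending a first occurrence that runs to the end of
-- l2 while lines of l1 remain: some block l1[i:i+t] first occurs at idx, matches l2 to its end, and
-- i + (len(l2) - idx) < len(l1).
def crashCond (l1 l2 : List String) : Bool :=
  (List.range l1.length).any (fun i =>
    (List.range (l1.length - i)).any (fun t =>
      match (List.range l2.length).find?
          (fun j => ((l1.drop i).take (t + 1)).isPrefixOf (l2.drop j)) with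
      | some idx =>
          decide (lcp (l1.drop i) (l2.drop idx) = l2.length - idx ∧
                  i + (l2.length - idx) < l1.length)
      | none => false))

-- Pre_ excludes exactly the inputs on which A raises (NameError on an unbound good_index, or
-- IndexError while extending a match past the end of l2); A returns normally on all others.
def Pre_process (l1num : Int) (l1 : List String) (l2num : Int) (l2 : List String) : Prop :=
  nameCond l1 l2 = false ∧ crashCond l1 l2 = false
instance (l1num : Int) (l1 : List String) (l2num : Int) (l2 : List String) : Decidable (Pre_process l1num l1 l2num l2) := by unfold Pre_process; infer_instance

def pvWitness_process : Int × List String × Int × List String := (0, ["a"], 0, ["a"])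

def Spec_process (l1num : Int) (l1 : List String) (l2num : Int) (l2 : List String) (out : List (List Int)) : Prop := out = process_alt l1num l1 l2num l2
instance (l1num : Int) (l1 : List String) (l2num : Int) (l2 : List String) (out : List (List Int)) : Decidable (Spec_process l1num l1 l2num l2 out) := by unfold Spec_process; infer_instance

-- ===== CLAIM (what is proved, stated in full; the proofs are below) =====
def Claim_equal_process : Prop := ∀ (l1num : Int) (l1 : List String) (l2num : Int) (l2 : List String), Dom_process l1num l1 l2num l2 → Pre_process l1num l1 l2num l2 → Spec_process l1num l1 l2num l2 (process l1num l1 l2num l2)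

-- ===== LEMMAS AND PROOFS =====

-- longest-common-extension of l1 from i and l2 from j
def LL (l1 l2 : List String) (i j : Nat) : Nat := lcp (l1.drop i) (l2.drop j)

def bestN (l1 l2 : List String) (i : Nat) : Nat :=
  ((List.range l2.length).map (fun j => LL l1 l2 i j)).foldl max 0

def firstN (l1 l2 : List String) (i : Nat) : Int :=
  if bestN l1 l2 i = 0 then -1
  else
    match (List.range l2.length).find? (fun j => LL l1 l2 i j == bestN l1 l2 i) with
    | some j => (j : Int)
    | none => -1

def cntN (l1 l2 : List String) (i : Nat) : Nat :=
  (List.range l2.length).countP (fun j => decide (LL l1 l2 i j = bestN l1 l2 i ∧ 0 < LL l1 l2 i j))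

def refStep (l1 l2 : List String) (st : List (List Int) × Nat) (i : Nat) : List (List Int) × Nat :=
  let b := bestN l1 l2 i
  if st.2 < i + b then
    ((if 0 < b ∧ cntN l1 l2 i = 1 then st.1 ++ [[(i : Int), (b : Int), firstN l1 l2 i]] else st.1),
     i + b)
  else st

theorem lcp_le_left (x y : List String) : lcp x y ≤ x.length := by
  induction x generalizing y with
  | nil => simp [lcp]
  | cons a as ih =>
    cases y with
    | nil => simp [lcp]
    | cons b bs =>
      simp only [lcp]
      split
      · simpa using ih bs
      · simp

theorem lcp_nil_right (x : List String) : lcp x [] = 0 := by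
  cases x <;> simp [lcp]

theorem take_prefix_iff_lcp : ∀ (t : Nat) (x y : List String), t ≤ x.length →
    (x.take t <+: y ↔ t ≤ lcp x y) := by
  intro t
  induction t with
  | zero => intro x y _; simp
  | succ t ih =>
    intro x y ht
    cases x with
    | nil => simp at ht
    | cons a as =>
      cases y with
      | nil =>
        simp [lcp]
      | cons b bs =>
        simp only [List.take_succ_cons, List.cons_prefix_cons, lcp]
        split
        · subst ‹a = b›
          rw [ih as bs (by simpa using ht)]
          constructor
          · rintro ⟨-, h⟩; omega
          · intro h; exact ⟨rfl, by omega⟩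
        · rename_i hab
          simp [hab]

theorem lcp_drop_add : ∀ (k : Nat) (x y : List String), k ≤ lcp x y →
    lcp x y = k + lcp (x.drop k) (y.drop k) := by
  intro k
  induction k with
  | zero => simp
  | succ k ih =>
    intro x y h
    cases x with
    | nil => simp [lcp] at h
    | cons a as =>
      cases y with
      | nil => simp [lcp] at h
      | cons b bs =>
        simp only [lcp, List.drop_succ_cons] at h ⊢
        split at h <;> rename_i hab
        · rw [if_pos hab]
          have := ih as bs (by omega)
          omega
        · exact absurd h (by omega)

def refFind (a b : List String) : Option Nat :=
  (List.range b.length).find? (fun j => a.isPrefixOf (b.drop j))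

theorem all_range_eq_isPrefixOf : ∀ (a y : List String),
    ((List.range a.length).all (fun k => a[k]? == y[k]?)) = a.isPrefixOf y := by
  intro a
  induction a with
  | nil => intro y; simp
  | cons x xs ih =>
    intro y
    rw [List.length_cons, List.range_succ_eq_map]
    cases y with
    | nil => simp
    | cons c cs =>
      simp only [List.all_cons, List.all_map, Function.comp_def, List.getElem?_cons_succ,
        List.getElem?_cons_zero, List.isPrefixOf]
      rw [ih cs]
      simp [Option.some_beq_some]

theorem fsCheck_eq_isPrefixOf (a b : List String) (j : Nat) :
    fsCheck a b (j : Int) = a.isPrefixOf (b.drop j) := by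
  unfold fsCheck
  rw [PySem.List.pyRange_zero_nat, List.all_map]
  rw [← all_range_eq_isPrefixOf a (b.drop j)]
  congr 1
  funext k
  simp only [Function.comp_def]
  have : (j : Int) + (k : Int) = ((j + k : Nat) : Int) := by push_cast; ring
  rw [this, PySem.List.pyGet?_natCast, PySem.List.pyGet?_natCast, List.getElem?_drop]

theorem isPrefixOf_false_of_short (a b : List String) (k : Nat)
    (ha : a ≠ []) (h : b.length < k + a.length) : a.isPrefixOf (b.drop k) = false := by
  by_contra hc
  have hp : a <+: b.drop k := by
    rw [← List.isPrefixOf_iff_prefix]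
    revert hc
    cases a.isPrefixOf (b.drop k) <;> simp
  have h1 := hp.length_le
  rw [List.length_drop] at h1
  have h2 : 1 ≤ a.length := by cases a <;> simp_all
  omega

theorem find?_range_eq_some_iff (n : Nat) (q : Nat → Bool) : ∀ (j : Nat),
    (List.range n).find? q = some j ↔ j < n ∧ q j = true ∧ ∀ k < j, q k = false := by
  induction n with
  | zero => simp
  | succ n ih =>
    intro j
    rw [List.range_succ, List.find?_append]
    cases h : (List.range n).find? q with
    | none =>
      have hall : ∀ k < n, q k = false := by
        intro k hk
        have := List.find?_eq_none.mp h k (by simp [hk])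
        simpa using this
      simp only [Option.none_or, List.find?_singleton]
      by_cases hq : q n = true
      · simp only [hq]
        constructor
        · rintro ⟨rfl⟩
          exact ⟨by omega, hq, hall⟩
        · rintro ⟨hj, hqj, hmin⟩
          rcases Nat.lt_succ_iff_lt_or_eq.mp hj with h' | rfl
          · rw [hall j h'] at hqj; cases hqj
          · rfl
      · rw [Bool.not_eq_true] at hq
        simp only [hq]
        constructor
        · rintro ⟨⟩
        · rintro ⟨hj, hqj, hmin⟩
          rcases Nat.lt_succ_iff_lt_or_eq.mp hj with h' | rfl
          · rw [hall j h'] at hqj; cases hqj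
          · rw [hq] at hqj; cases hqj
    | some j0 =>
      simp only [Option.some_or]
      rw [ih j0] at h
      obtain ⟨hj0, hq0, hmin0⟩ := h
      constructor
      · rintro ⟨rfl⟩
        exact ⟨by omega, hq0, hmin0⟩
      · rintro ⟨hj, hqj, hmin⟩
        rcases Nat.lt_trichotomy j j0 with h' | rfl | h'
        · rw [hmin0 j h'] at hqj; cases hqj
        · rfl
        · rw [hmin j0 h'] at hq0; cases hq0

theorem find_sublist_eq (a b : List String) (ha : a ≠ []) :
    find_sublist a b = match refFind a b with | some j => (j : Int) | none => -1 := by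
  have hlen : 1 ≤ a.length := by
    cases a with
    | nil => exact absurd rfl ha
    | cons c cs => simp
  unfold find_sublist
  rw [PySem.List.pyRange_zero, List.find?_map]
  have hpred : (fsCheck a b ∘ fun k : Nat => (k : Int)) = fun k => a.isPrefixOf (b.drop k) := by
    funext k; simp only [Function.comp_def]; exact fsCheck_eq_isPrefixOf a b k
  rw [hpred]
  have key : (List.range ((b.length : Int) - (a.length : Int) + 1).toNat).find?
      (fun j => a.isPrefixOf (b.drop j)) = refFind a b := by
    unfold refFind
    by_cases hab : a.length ≤ b.length
    · have hK : ((b.length : Int) - (a.length : Int) + 1).toNat = b.length - a.length + 1 := by omega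
      rw [hK]
      have hsplit : b.length = (b.length - a.length + 1) + (a.length - 1) := by omega
      conv_rhs => rw [hsplit, List.range_add, List.find?_append]
      have : (List.map (fun k => b.length - a.length + 1 + k) (List.range (a.length - 1))).find?
          (fun j => a.isPrefixOf (b.drop j)) = none := by
        rw [List.find?_eq_none]
        intro x hx
        simp only [List.mem_map] at hx
        obtain ⟨k, hk, rfl⟩ := hx
        simp only [Bool.not_eq_true]
        exact isPrefixOf_false_of_short a b _ ha (by simp at hk; omega)
      rw [this, Option.or_none]
    · have hK : ((b.length : Int) - (a.length : Int) + 1).toNat = 0 := by omega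
      rw [hK]
      simp only [List.range_zero, List.find?_nil]
      symm
      rw [List.find?_eq_none]
      intro x hx
      simp only [Bool.not_eq_true]
      exact isPrefixOf_false_of_short a b x ha (by simp at hx ⊢; omega)
  rw [key]
  cases refFind a b <;> simp

theorem extendA_stop (l1 l2 : List String) (i index : Int) (e : Nat) (he : l1.length ≤ e) :
    extendA l1 l2 i index (e : Int) = (e : Int) := by
  rw [extendA.eq_def, dif_neg]
  rintro ⟨-, hs, -⟩
  rw [PySem.List.pyGet?_natCast, List.getElem?_eq_none (by omega)] at hs
  cases hs

theorem extendA_eq (l1 l2 : List String) (i index : Int) :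
    ∀ (k e q : Nat), l1.length ≤ e + k → index - i + (e : Int) = (q : Int) →
    extendA l1 l2 i index (e : Int) = ((e + lcp (l1.drop e) (l2.drop q) : Nat) : Int) := by
  intro k
  induction k with
  | zero =>
    intro e q hk hq
    rw [extendA_stop l1 l2 i index e (by omega), List.drop_eq_nil_of_le (by omega)]
    simp [lcp]
  | succ k ih =>
    intro e q hk hq
    by_cases he : l1.length ≤ e
    · rw [extendA_stop l1 l2 i index e he, List.drop_eq_nil_of_le he]
      simp [lcp]
    · have he' : e < l1.length := by omega
      have hget1 : PySem.List.pyGet? l1 (e : Int) = some l1[e] := by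
        rw [PySem.List.pyGet?_natCast]; exact List.getElem?_eq_getElem he'
      by_cases hq2 : q < l2.length
      · have hget2 : PySem.List.pyGet? l2 (index - i + (e : Int)) = some l2[q] := by
          rw [hq, PySem.List.pyGet?_natCast]; exact List.getElem?_eq_getElem hq2
        by_cases heq : l1[e] = l2[q]
        · rw [extendA.eq_def, dif_pos ⟨by intro hc; exact absurd (by exact_mod_cast hc) (by omega),
            by rw [hget1]; rfl, by rw [hget1, hget2, heq]⟩]
          have hcast : (e : Int) + 1 = ((e + 1 : Nat) : Int) := by push_cast; ring
          rw [hcast, ih (e + 1) (q + 1) (by omega) (by push_cast at hq ⊢; omega)]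
          rw [List.drop_eq_getElem_cons he', List.drop_eq_getElem_cons hq2]
          simp only [lcp, if_pos heq]
          push_cast
          ring
        · have hne : ¬((e:Int) ≠ (l1.length:Int) ∧ (PySem.List.pyGet? l1 (e:Int)).isSome ∧
              PySem.List.pyGet? l1 (e:Int) = PySem.List.pyGet? l2 (index - i + (e:Int))) := by
            rintro ⟨-, -, hc⟩
            rw [hget1, hget2] at hc
            exact heq (by simpa using hc)
          rw [extendA.eq_def, dif_neg hne]
          rw [List.drop_eq_getElem_cons he', List.drop_eq_getElem_cons hq2]
          simp only [lcp, if_neg heq]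
          simp
      · have hget2 : PySem.List.pyGet? l2 (index - i + (e : Int)) = none := by
          rw [hq, PySem.List.pyGet?_natCast]; exact List.getElem?_eq_none (by omega)
        rw [extendA.eq_def, dif_neg (by rintro ⟨-, -, hc⟩; rw [hget1, hget2] at hc; cases hc)]
        rw [show l2.drop q = ([] : List String) from List.drop_eq_nil_of_le (by omega), lcp_nil_right]
        simp

theorem bestN_ub (l1 l2 : List String) (i j : Nat) (hj : j < l2.length) :
    LL l1 l2 i j ≤ bestN l1 l2 i := by
  unfold bestN
  exact (PySem.List.le_foldl_max _ _).2 _ (List.mem_map_of_mem (by simp [hj]))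

theorem bestN_cases (l1 l2 : List String) (i : Nat) :
    bestN l1 l2 i = 0 ∨ ∃ j < l2.length, LL l1 l2 i j = bestN l1 l2 i := by
  rcases PySem.List.foldl_max_mem ((List.range l2.length).map (fun j => LL l1 l2 i j)) 0 with h | h
  · left; exact h
  · right
    simp only [List.mem_map, List.mem_range] at h
    obtain ⟨j, hj, hLL⟩ := h
    exact ⟨j, hj, by rw [bestN, ← hLL]⟩

theorem bestN_le (l1 l2 : List String) (i : Nat) : bestN l1 l2 i ≤ l1.length - i := by
  rcases bestN_cases l1 l2 i with h | ⟨j, hj, hLL⟩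
  · omega
  · rw [← hLL]
    unfold LL
    have := lcp_le_left (l1.drop i) (l2.drop j)
    simp [List.length_drop] at this
    omega

theorem prefix_slice_iff (l1 l2 : List String) (i t j : Nat) (ht : t ≤ l1.length - i) :
    ((l1.drop i).take t).isPrefixOf (l2.drop j) = decide (t ≤ LL l1 l2 i j) := by
  by_cases h : t ≤ LL l1 l2 i j
  · simp only [h, decide_true]
    rw [List.isPrefixOf_iff_prefix]
    exact (take_prefix_iff_lcp t (l1.drop i) (l2.drop j) (by simp; omega)).mpr h
  · simp only [h, decide_false]
    by_contra hc
    rw [Bool.not_eq_false, List.isPrefixOf_iff_prefix] at hc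
    exact h ((take_prefix_iff_lcp t (l1.drop i) (l2.drop j) (by simp; omega)).mp hc)

theorem firstN_spec (l1 l2 : List String) (i : Nat) (hb : 0 < bestN l1 l2 i) :
    ∃ j0 : Nat, firstN l1 l2 i = (j0 : Int) ∧ j0 < l2.length ∧ LL l1 l2 i j0 = bestN l1 l2 i ∧
      ∀ k < j0, LL l1 l2 i k ≠ bestN l1 l2 i := by
  rcases bestN_cases l1 l2 i with h | ⟨j, hj, hLL⟩
  · omega
  · unfold firstN
    rw [if_neg (by omega)]
    cases hf : (List.range l2.length).find? (fun j => LL l1 l2 i j == bestN l1 l2 i) with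
    | none =>
      exfalso
      have := List.find?_eq_none.mp hf j (by simp [hj])
      simp [hLL] at this
    | some j0 =>
      obtain ⟨h1, h2, h3⟩ := (find?_range_eq_some_iff l2.length _ j0).mp hf
      refine ⟨j0, rfl, h1, by simpa using h2, fun k hk => ?_⟩
      have := h3 k hk
      simpa using this

theorem whileA_eq (l1 l2 : List String) (i : Nat) : ∀ (k e : Nat) (g : Int), i ≤ e → e ≤ l1.length →
    l1.length ≤ e + k →
    whileA l1 l2 (i : Int) (e : Int) g =
      if e < i + bestN l1 l2 i then (((i + bestN l1 l2 i : Nat) : Int), firstN l1 l2 i)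
      else ((e : Int), g) := by
  have hble := bestN_le l1 l2 i
  intro k
  induction k with
  | zero =>
    intro e g hie hen hfuel
    have he : e = l1.length := by omega
    rw [whileA.eq_def, if_pos (by exact_mod_cast congrArg (Nat.cast (R := Int)) he)]
    rw [if_neg (by omega)]
  | succ k ih =>
    intro e g hie hen hfuel
    by_cases he : e = l1.length
    · rw [whileA.eq_def, if_pos (by exact_mod_cast congrArg (Nat.cast (R := Int)) he)]
      rw [if_neg (by omega)]
    · have hen' : e < l1.length := by omega
      rw [whileA.eq_def, if_neg (by intro hc; exact he (by exact_mod_cast hc))]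
      have hcast1 : (e : Int) + 1 = ((e + 1 : Nat) : Int) := by push_cast; ring
      have hslice : PySem.List.slice l1 (some (i : Int)) (some ((e : Int) + 1)) =
          (l1.drop i).take (e + 1 - i) := by
        rw [hcast1, PySem.List.slice_natCast]
      have hane : (l1.drop i).take (e + 1 - i) ≠ [] := by
        have : ((l1.drop i).take (e + 1 - i)).length = min (e + 1 - i) (l1.length - i) := by simp
        intro hc
        rw [hc] at this
        simp at this
        omega
      rw [hslice, find_sublist_eq _ _ hane]
      have hpred : (fun j => ((l1.drop i).take (e + 1 - i)).isPrefixOf (l2.drop j)) =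
          (fun j => decide (e + 1 - i ≤ LL l1 l2 i j)) := by
        funext j
        exact prefix_slice_iff l1 l2 i (e + 1 - i) j (by omega)
      unfold refFind
      rw [hpred]
      cases hf : (List.range l2.length).find? (fun j => decide (e + 1 - i ≤ LL l1 l2 i j)) with
      | none =>
        have hnone : ∀ j < l2.length, ¬ (e + 1 - i ≤ LL l1 l2 i j) := by
          intro j hj
          have := List.find?_eq_none.mp hf j (by simp [hj])
          simpa using this
        have hblt : i + bestN l1 l2 i ≤ e := by
          rcases bestN_cases l1 l2 i with h0 | ⟨j, hj, hLL⟩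
          · omega
          · have := hnone j hj
            omega
        simp only [if_pos (show (-1 : Int) < 0 by norm_num)]
        rw [if_neg (by omega)]
      | some j0 =>
        obtain ⟨hj0m, hj0p, hj0min⟩ := (find?_range_eq_some_iff l2.length _ j0).mp hf
        have hj0p' : e + 1 - i ≤ LL l1 l2 i j0 := by simpa using hj0p
        rw [if_neg (by simp)]
        -- extendA evaluates to i + LL i j0
        have hq : (j0 : Int) - (i : Int) + (e : Int) = ((j0 + (e - i) : Nat) : Int) := by
          push_cast; omega
        have hext := extendA_eq l1 l2 (i : Int) (j0 : Int) (l1.length) e (j0 + (e - i))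
          (by omega) hq
        have hLLsplit : LL l1 l2 i j0 = (e - i) + lcp (l1.drop e) (l2.drop (j0 + (e - i))) := by
          have h1 := lcp_drop_add (e - i) (l1.drop i) (l2.drop j0) (by unfold LL at hj0p'; omega)
          unfold LL at h1 ⊢
          rw [List.drop_drop, List.drop_drop] at h1
          rw [show i + (e - i) = e by omega] at h1
          exact h1
        have hext2 : extendA l1 l2 (i : Int) (j0 : Int) (e : Int) = ((i + LL l1 l2 i j0 : Nat) : Int) := by
          rw [hext]
          congr 1
          omega
        have hLLub : LL l1 l2 i j0 ≤ bestN l1 l2 i := bestN_ub l1 l2 i j0 hj0m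
        rw [hext2]
        have hd1 : (e : Int) < ((i + LL l1 l2 i j0 : Nat) : Int) := by
          have : e < i + LL l1 l2 i j0 := by omega
          exact_mod_cast this
        have hd2 : ((i + LL l1 l2 i j0 : Nat) : Int) ≤ (l1.length : Int) := by
          have : i + LL l1 l2 i j0 ≤ l1.length := by omega
          exact_mod_cast this
        rw [dif_pos ⟨hd1, hd2⟩]
        rw [ih (i + LL l1 l2 i j0) (j0 : Int) (by omega) (by omega) (by omega)]
        have hcond : e < i + bestN l1 l2 i := by omega
        rw [if_pos hcond]
        by_cases hlt : i + LL l1 l2 i j0 < i + bestN l1 l2 i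
        · rw [if_pos hlt]
        · rw [if_neg hlt]
          have heq : LL l1 l2 i j0 = bestN l1 l2 i := by omega
          have hbpos : 0 < bestN l1 l2 i := by omega
          obtain ⟨j1, hfst, hj1m, hj1LL, hj1min⟩ := firstN_spec l1 l2 i hbpos
          have : j1 = j0 := by
            rcases Nat.lt_trichotomy j1 j0 with h' | h' | h'
            · have hlt2 := hj0min j1 h'
              simp only [decide_eq_false_iff_not, not_le] at hlt2
              rw [hj1LL] at hlt2
              omega
            · exact h'
            · exact absurd heq (hj1min j0 h')
          rw [hfst, this, heq]

def stepA (l1 l2 : List String) (st : List (List Int) × Int × Int) (i : Int) :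
    List (List Int) × Int × Int :=
  let e0 := max st.2.1 i
  let p := whileA l1 l2 i e0 st.2.2
  if st.2.1 < p.1 then
    if find_sublist (PySem.List.slice l1 (some i) (some p.1))
        (PySem.List.slice l2 (some (p.2 + 1)) none) < 0 then
      (st.1 ++ [[i, p.1 - i, p.2]], p.1, p.2)
    else (st.1, p.1, p.2)
  else (st.1, st.2.1, p.2)

theorem process_eq_fold (l1num : Int) (l1 : List String) (l2num : Int) (l2 : List String) :
    process l1num l1 l2num l2 =
      ((PySem.List.pyRange 0 (l1.length : Int) 1).foldl (stepA l1 l2) ([], 0, 0)).1 := rfl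

theorem find_sublist_nil (b : List String) : find_sublist [] b = 0 := by
  unfold find_sublist
  rw [PySem.List.pyRange_zero]
  have h1 : ((b.length : Int) - (([] : List String).length : Int) + 1).toNat = b.length + 1 := by
    simp
  rw [h1, List.range_succ_eq_map, List.map_cons]
  have h2 : fsCheck [] b (((0 : Nat) : Int)) = true := by
    unfold fsCheck
    simp
  rw [List.find?_cons_of_pos h2]
  simp

theorem cnt_eq_one_iff (l1 l2 : List String) (i j0 : Nat) (hb : 0 < bestN l1 l2 i)
    (hj0m : j0 < l2.length) (hj0 : LL l1 l2 i j0 = bestN l1 l2 i)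
    (hmin : ∀ k < j0, LL l1 l2 i k ≠ bestN l1 l2 i) :
    (cntN l1 l2 i = 1 ↔ ∀ j, j0 < j → j < l2.length → LL l1 l2 i j ≠ bestN l1 l2 i) := by
  unfold cntN
  have hsplit : l2.length = (j0 + 1) + (l2.length - (j0 + 1)) := by omega
  rw [hsplit, List.range_add, List.countP_append, List.range_succ, List.countP_append]
  have hc0 : (List.range j0).countP
      (fun j => decide (LL l1 l2 i j = bestN l1 l2 i ∧ 0 < LL l1 l2 i j)) = 0 := by
    rw [List.countP_eq_zero]
    intro k hk
    simp only [List.mem_range] at hk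
    simp only [decide_eq_true_eq, not_and]
    intro hc
    exact absurd hc (hmin k hk)
  have hc1 : ([j0]).countP
      (fun j => decide (LL l1 l2 i j = bestN l1 l2 i ∧ 0 < LL l1 l2 i j)) = 1 := by
    simp [hj0, hb]
  rw [hc0, hc1]
  constructor
  · intro h j hj1 hj2 hc
    have hz : (List.countP (fun j => decide (LL l1 l2 i j = bestN l1 l2 i ∧ 0 < LL l1 l2 i j))
        (List.map (fun k => j0 + 1 + k) (List.range (l2.length - (j0 + 1))))) = 0 := by omega
    rw [List.countP_eq_zero] at hz
    exact hz j (by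
      simp only [List.mem_map, List.mem_range]
      exact ⟨j - (j0 + 1), by omega, by omega⟩) (by simp [hc]; omega)
  · intro h
    have hz : (List.countP (fun j => decide (LL l1 l2 i j = bestN l1 l2 i ∧ 0 < LL l1 l2 i j))
        (List.map (fun k => j0 + 1 + k) (List.range (l2.length - (j0 + 1))))) = 0 := by
      rw [List.countP_eq_zero]
      intro x hx
      simp only [List.mem_map, List.mem_range] at hx
      obtain ⟨u, hu, rfl⟩ := hx
      simp only [decide_eq_true_eq, not_and]
      intro hc
      exact absurd hc (h _ (by omega) (by omega))
    omega

theorem second_find_iff (l1 l2 : List String) (i j0 : Nat) (hb : 0 < bestN l1 l2 i)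
    (hble : bestN l1 l2 i ≤ l1.length - i) (hj0m : j0 < l2.length)
    (hj0 : LL l1 l2 i j0 = bestN l1 l2 i)
    (hmin : ∀ k < j0, LL l1 l2 i k ≠ bestN l1 l2 i) :
    (find_sublist ((l1.drop i).take (bestN l1 l2 i)) (l2.drop (j0 + 1)) < 0 ↔
      cntN l1 l2 i = 1) := by
  have hane : (l1.drop i).take (bestN l1 l2 i) ≠ [] := by
    have hl : ((l1.drop i).take (bestN l1 l2 i)).length = min (bestN l1 l2 i) (l1.length - i) := by
      simp
    intro hc
    rw [hc] at hl
    simp at hl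
    omega
  rw [find_sublist_eq _ _ hane]
  rw [cnt_eq_one_iff l1 l2 i j0 hb hj0m hj0 hmin]
  unfold refFind
  have hpred : (fun j => ((l1.drop i).take (bestN l1 l2 i)).isPrefixOf ((l2.drop (j0 + 1)).drop j))
      = fun j => decide (bestN l1 l2 i ≤ LL l1 l2 i (j0 + 1 + j)) := by
    funext j
    rw [List.drop_drop]
    exact prefix_slice_iff l1 l2 i (bestN l1 l2 i) (j0 + 1 + j) (by omega)
  rw [hpred]
  cases hf : (List.range (l2.drop (j0 + 1)).length).find?
      (fun j => decide (bestN l1 l2 i ≤ LL l1 l2 i (j0 + 1 + j))) with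
  | none =>
    dsimp only
    have hnone := List.find?_eq_none.mp hf
    constructor
    · intro _ j hj1 hj2 hc
      have hj' := hnone (j - (j0 + 1)) (by simp only [List.mem_range, List.length_drop]; omega)
      simp only [decide_eq_true_eq, not_le] at hj'
      rw [show j0 + 1 + (j - (j0 + 1)) = j by omega] at hj'
      omega
    · intro _
      norm_num
  | some u =>
    dsimp only
    obtain ⟨hu1, hu2, -⟩ := (find?_range_eq_some_iff (l2.drop (j0 + 1)).length _ u).mp hf
    rw [List.length_drop] at hu1
    simp only [decide_eq_true_eq] at hu2
    have hequ : LL l1 l2 i (j0 + 1 + u) = bestN l1 l2 i :=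
      le_antisymm (bestN_ub l1 l2 i (j0 + 1 + u) (by omega)) hu2
    constructor
    · intro hneg
      exfalso
      omega
    · intro h
      exact ((h (j0 + 1 + u) (by omega) (by omega)) hequ).elim
theorem stepA_sim (l1 l2 : List String) (i : Nat) (hin : i < l1.length)
    (res : List (List Int)) (le : Nat) (hle : le ≤ l1.length) (g : Int) :
    ∃ g' : Int, stepA l1 l2 (res, (le : Int), g) (i : Int) =
      ((refStep l1 l2 (res, le) i).1, ((refStep l1 l2 (res, le) i).2 : Int), g') ∧
      (refStep l1 l2 (res, le) i).2 ≤ l1.length := by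
  have hble := bestN_le l1 l2 i
  unfold stepA
  dsimp only
  have hmaxcast : max ((le : Int)) ((i : Int)) = ((max le i : Nat) : Int) := by
    rw [Nat.cast_max]
  rw [hmaxcast]
  rw [whileA_eq l1 l2 i l1.length (max le i) g (by omega) (by omega) (by omega)]
  by_cases hc : max le i < i + bestN l1 l2 i
  · rw [if_pos hc]
    have hb : 0 < bestN l1 l2 i := by omega
    obtain ⟨j0, hfst, hj0m, hj0LL, hj0min⟩ := firstN_spec l1 l2 i hb
    have hlt : ((le : Int)) < (((i + bestN l1 l2 i : Nat)) : Int) := by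
      have : le < i + bestN l1 l2 i := by omega
      exact_mod_cast this
    rw [if_pos hlt]
    have hsl1 : PySem.List.slice l1 (some ((i : Int))) (some (((i + bestN l1 l2 i : Nat) : Int))) =
        (l1.drop i).take (bestN l1 l2 i) := by
      rw [PySem.List.slice_natCast]
      congr 1
      omega
    have hsl2 : PySem.List.slice l2 (some (firstN l1 l2 i + 1)) none = l2.drop (j0 + 1) := by
      rw [hfst, show ((j0 : Int) + 1) = ((j0 + 1 : Nat) : Int) by push_cast; ring,
        PySem.List.slice_from_natCast]
    rw [hsl1, hsl2, hfst]
    have hiff := second_find_iff l1 l2 i j0 hb hble hj0m hj0LL hj0min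
    by_cases hu : cntN l1 l2 i = 1
    · rw [if_pos (hiff.mpr hu)]
      refine ⟨(j0 : Int), ?_, ?_⟩
      · unfold refStep
        rw [if_pos (show le < i + bestN l1 l2 i by omega), if_pos ⟨hb, hu⟩]
        simp only [hfst]
        rw [show ((i + bestN l1 l2 i : Nat) : Int) - (i : Int) = ((bestN l1 l2 i : Nat) : Int) by
          push_cast; ring]
      · unfold refStep
        rw [if_pos (show le < i + bestN l1 l2 i by omega)]
        omega
    · rw [if_neg (fun hneg => hu (hiff.mp hneg))]
      refine ⟨(j0 : Int), ?_, ?_⟩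
      · unfold refStep
        rw [if_pos (show le < i + bestN l1 l2 i by omega), if_neg (by tauto)]
      · unfold refStep
        rw [if_pos (show le < i + bestN l1 l2 i by omega)]
        omega
  · rw [if_neg hc]
    by_cases hlt : le < i
    · have hmax : max le i = i := by omega
      have hb0 : bestN l1 l2 i = 0 := by omega
      rw [hmax]
      rw [if_pos (show ((le : Int)) < ((i : Nat) : Int) by exact_mod_cast hlt)]
      have hsl : PySem.List.slice l1 (some ((i : Int))) (some ((i : Nat) : Int)) = [] := by
        rw [PySem.List.slice_natCast]
        simp
      rw [hsl, find_sublist_nil]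
      rw [if_neg (by norm_num)]
      refine ⟨g, ?_, ?_⟩
      · unfold refStep
        rw [if_pos (show le < i + bestN l1 l2 i by omega), if_neg (by rintro ⟨h1, -⟩; omega)]
        rw [hb0]
        simp
      · unfold refStep
        rw [if_pos (show le < i + bestN l1 l2 i by omega)]
        omega
    · have hmax : max le i = le := by omega
      rw [hmax]
      rw [if_neg (by omega)]
      refine ⟨g, ?_, ?_⟩
      · unfold refStep
        rw [if_neg (by omega)]
      · unfold refStep
        rw [if_neg (by omega)]
        omega

theorem foldA_sim (l1 l2 : List String) : ∀ (l : List Nat), (∀ x ∈ l, x < l1.length) →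
    ∀ (res : List (List Int)) (le : Nat), le ≤ l1.length → ∀ (g : Int),
    ((l.map (fun k => (Nat.cast k : Int))).foldl (stepA l1 l2) (res, (le : Int), g)).1 =
      (l.foldl (refStep l1 l2) (res, le)).1 := by
  intro l
  induction l with
  | nil => intro _ res le _ g; rfl
  | cons x xs ih =>
    intro hmem res le hle g
    rw [List.map_cons, List.foldl_cons, List.foldl_cons]
    obtain ⟨g', hstep, hbound⟩ := stepA_sim l1 l2 x (hmem x (by simp)) res le hle g
    rw [hstep]
    have := ih (fun y hy => hmem y (by simp [hy])) (refStep l1 l2 (res, le) x).1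
      (refStep l1 l2 (res, le) x).2 hbound g'
    rw [this]

theorem portA_eq_ref (l1num : Int) (l1 : List String) (l2num : Int) (l2 : List String) :
    process l1num l1 l2num l2 = ((List.range l1.length).foldl (refStep l1 l2) ([], 0)).1 := by
  rw [process_eq_fold l1num l1 l2num l2, PySem.List.pyRange_zero_nat]
  have := foldA_sim l1 l2 (List.range l1.length) (fun x hx => by simpa using hx) [] 0
    (by omega) 0
  simpa using this

def tripleRef (l1 l2 : List String) (i : Nat) : Int × Int × Int :=
  ((bestN l1 l2 i : Int), firstN l1 l2 i, (cntN l1 l2 i : Int))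

def rowRef (l1 l2 : List String) (i : Nat) : List Int :=
  (List.range l2.length).map (fun j => (LL l1 l2 i j : Int)) ++ [0]

def stepB1 (l1 l2 : List String) (st : List (Int × Int × Int) × List Int) (i : Int) :
    List (Int × Int × Int) × List Int :=
  let row := ((PySem.List.pyRange 0 (l2.length : Int) 1).map (fun j =>
      if PySem.List.pyGet? l1 i == PySem.List.pyGet? l2 j then
        PySem.List.pyGetD st.2 (j + 1) 0 + 1
      else 0)) ++ [0]
  let t := (PySem.List.pyRange 0 (l2.length : Int) 1).foldl
    (fun (s : Int × Int × Int) j =>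
      let v := PySem.List.pyGetD row j 0
      if s.1 < v then (v, j, 1)
      else if v = s.1 ∧ 0 < v then (s.1, s.2.1, s.2.2 + 1) else s)
    (0, -1, 0)
  (st.1 ++ [t], row)

def stepB2 (st : List (List Int) × Int) (p : Int × Int × Int × Int) : List (List Int) × Int :=
  let f := p.1 + p.2.1
  if st.2 < f then
    (if p.2.2.2 = 1 then st.1 ++ [[p.1, p.2.1, p.2.2.1]] else st.1, f)
  else st

theorem processAlt_eq_fold (l1num : Int) (l1 : List String) (l2num : Int) (l2 : List String) :
    process_alt l1num l1 l2num l2 =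
      ((PySem.List.enumerate
          ((((PySem.List.pyRange 0 (l1.length : Int) 1).reverse).foldl (stepB1 l1 l2)
            ([], List.replicate (l2.length + 1) (0 : Int))).1.reverse)).foldl stepB2 ([], 0)).1 :=
  rfl

theorem lcp_nil_left (y : List String) : lcp [] y = 0 := by cases y <;> rfl

theorem LL_succ (l1 l2 : List String) (i j : Nat) (hi : i < l1.length) (hj : j < l2.length) :
    LL l1 l2 i j = if l1[i] = l2[j] then LL l1 l2 (i + 1) (j + 1) + 1 else 0 := by
  unfold LL
  rw [List.drop_eq_getElem_cons hi, List.drop_eq_getElem_cons hj]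
  rfl

theorem rowRef_getD (l1 l2 : List String) (i' j' : Nat) (h : j' ≤ l2.length) :
    (rowRef l1 l2 i').getD j' 0 = (LL l1 l2 i' j' : Int) := by
  unfold rowRef
  rcases Nat.lt_or_ge j' l2.length with hlt | hge
  · rw [List.getD_eq_getElem?_getD, List.getElem?_append_left (by simpa using hlt)]
    simp [hlt]
  · have hj : j' = l2.length := by omega
    subst hj
    rw [List.getD_eq_getElem?_getD, List.getElem?_append_right (by simp)]
    simp only [List.length_map, List.length_range, Nat.sub_self, List.getElem?_cons_zero,
      Option.getD_some]
    unfold LL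
    rw [List.drop_length, lcp_nil_right]
    simp

theorem rowStep_eq (l1 l2 : List String) (i : Nat) (hi : i < l1.length) :
    ((PySem.List.pyRange 0 (l2.length : Int) 1).map (fun j =>
        if PySem.List.pyGet? l1 (i : Int) == PySem.List.pyGet? l2 j then
          PySem.List.pyGetD (rowRef l1 l2 (i + 1)) (j + 1) 0 + 1
        else 0)) ++ [0] = rowRef l1 l2 i := by
  conv_rhs => rw [rowRef]
  congr 1
  rw [PySem.List.pyRange_zero_nat, List.map_map]
  apply List.map_congr_left
  intro j hj
  simp only [List.mem_range] at hj
  simp only [Function.comp_def]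
  rw [PySem.List.pyGet?_natCast, PySem.List.pyGet?_natCast,
    List.getElem?_eq_getElem hi, List.getElem?_eq_getElem hj]
  rw [show ((j : Int) + 1) = ((j + 1 : Nat) : Int) by push_cast; ring,
    PySem.List.pyGetD_natCast, rowRef_getD l1 l2 (i + 1) (j + 1) (by omega)]
  rw [LL_succ l1 l2 i j hi hj]
  by_cases heq : l1[i] = l2[j]
  · rw [if_pos heq]
    simp [heq]
  · rw [if_neg heq]
    simp [heq]

def bK (l1 l2 : List String) (i k : Nat) : Nat :=
  ((List.range k).map (fun j => LL l1 l2 i j)).foldl max 0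

theorem bK_ub (l1 l2 : List String) (i k j : Nat) (hj : j < k) : LL l1 l2 i j ≤ bK l1 l2 i k := by
  unfold bK
  exact (PySem.List.le_foldl_max _ _).2 _ (List.mem_map_of_mem (by simp [hj]))

theorem bK_cases (l1 l2 : List String) (i k : Nat) :
    bK l1 l2 i k = 0 ∨ ∃ j < k, LL l1 l2 i j = bK l1 l2 i k := by
  rcases PySem.List.foldl_max_mem ((List.range k).map (fun j => LL l1 l2 i j)) 0 with h | h
  · left; exact h
  · right
    simp only [List.mem_map, List.mem_range] at h
    obtain ⟨j, hjk, hLL⟩ := h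
    exact ⟨j, hjk, by rw [bK, ← hLL]⟩

def fK (l1 l2 : List String) (i k : Nat) : Int :=
  if bK l1 l2 i k = 0 then -1
  else
    match (List.range k).find? (fun j => LL l1 l2 i j == bK l1 l2 i k) with
    | some j => (j : Int)
    | none => -1

def cK (l1 l2 : List String) (i k : Nat) : Nat :=
  (List.range k).countP (fun j => decide (LL l1 l2 i j = bK l1 l2 i k ∧ 0 < LL l1 l2 i j))

theorem bK_succ (l1 l2 : List String) (i k : Nat) :
    bK l1 l2 i (k + 1) = max (bK l1 l2 i k) (LL l1 l2 i k) := by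
  unfold bK
  rw [List.range_succ, List.map_append, List.foldl_append]
  rfl

theorem agg_fold (l1 l2 : List String) (i : Nat) : ∀ (k : Nat),
    (List.range k).foldl
      (fun (s : Int × Int × Int) (j : Nat) =>
        if s.1 < (LL l1 l2 i j : Int) then ((LL l1 l2 i j : Int), (j : Int), 1)
        else if (LL l1 l2 i j : Int) = s.1 ∧ 0 < (LL l1 l2 i j : Int) then
          (s.1, s.2.1, s.2.2 + 1)
        else s)
      (0, -1, 0) =
      ((bK l1 l2 i k : Int), fK l1 l2 i k, (cK l1 l2 i k : Int)) := by
  intro k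
  induction k with
  | zero => rfl
  | succ k ih =>
    rw [List.range_succ, List.foldl_append, ih, List.foldl_cons, List.foldl_nil]
    have hub : ∀ j < k, LL l1 l2 i j ≤ bK l1 l2 i k := fun j hj => bK_ub l1 l2 i k j hj
    have hsucc := bK_succ l1 l2 i k
    by_cases hv : (bK l1 l2 i k : Int) < (LL l1 l2 i k : Int)
    · have hvn : bK l1 l2 i k < LL l1 l2 i k := by exact_mod_cast hv
      rw [if_pos hv]
      have hb1 : bK l1 l2 i (k + 1) = LL l1 l2 i k := by omega
      have hf1 : fK l1 l2 i (k + 1) = (k : Int) := by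
        unfold fK
        rw [if_neg (by omega)]
        have : (List.range (k + 1)).find? (fun j => LL l1 l2 i j == bK l1 l2 i (k + 1)) =
            some k := by
          rw [find?_range_eq_some_iff]
          refine ⟨by omega, by simp [hb1], fun j hj => ?_⟩
          simp only [beq_eq_false_iff_ne, ne_eq]
          have := hub j hj
          omega
        rw [this]
      have hc1 : cK l1 l2 i (k + 1) = 1 := by
        unfold cK
        rw [List.range_succ, List.countP_append]
        have h0 : (List.range k).countP
            (fun j => decide (LL l1 l2 i j = bK l1 l2 i (k + 1) ∧ 0 < LL l1 l2 i j)) = 0 := by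
          rw [List.countP_eq_zero]
          intro j hjm
          simp only [List.mem_range] at hjm
          have := hub j hjm
          simp only [decide_eq_true_eq, not_and]
          omega
        rw [h0]
        simp [hb1]
        omega
      rw [hb1, hf1, hc1]
      simp
    · rw [if_neg hv]
      have hvn : LL l1 l2 i k ≤ bK l1 l2 i k := by omega
      have hb1 : bK l1 l2 i (k + 1) = bK l1 l2 i k := by omega
      by_cases hv2 : (LL l1 l2 i k : Int) = (bK l1 l2 i k : Int) ∧ 0 < (LL l1 l2 i k : Int)
      · rw [if_pos hv2]
        obtain ⟨hv2a, hv2b⟩ := hv2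
        have hv2a' : LL l1 l2 i k = bK l1 l2 i k := by exact_mod_cast hv2a
        have hv2b' : 0 < LL l1 l2 i k := by exact_mod_cast hv2b
        have hbpos : 0 < bK l1 l2 i k := by omega
        obtain ⟨j1, hj1k, hj1LL⟩ := (bK_cases l1 l2 i k).resolve_left (by omega)
        have hfind : ∃ j0, (List.range k).find? (fun j => LL l1 l2 i j == bK l1 l2 i k) =
            some j0 := by
          cases hf : (List.range k).find? (fun j => LL l1 l2 i j == bK l1 l2 i k) with
          | none =>
            exfalso
            have := List.find?_eq_none.mp hf j1 (by simp [hj1k])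
            simp [hj1LL] at this
          | some j0 => exact ⟨j0, rfl⟩
        obtain ⟨j0, hj0⟩ := hfind
        have hf1 : fK l1 l2 i (k + 1) = fK l1 l2 i k := by
          unfold fK
          rw [if_neg (by omega), if_neg (by omega), hb1]
          rw [List.range_succ, List.find?_append, hj0]
          rfl
        have hc1 : cK l1 l2 i (k + 1) = cK l1 l2 i k + 1 := by
          unfold cK
          rw [hb1, List.range_succ, List.countP_append]
          simp [hv2a']
          omega
        rw [hb1, hf1, hc1]
        unfold fK
        rw [if_neg (by omega), hj0]
        push_cast
        rfl
      · rw [if_neg hv2]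
        have hf1 : fK l1 l2 i (k + 1) = fK l1 l2 i k := by
          unfold fK
          rw [hb1]
          by_cases hb0 : bK l1 l2 i k = 0
          · rw [if_pos hb0, if_pos hb0]
          · rw [if_neg hb0, if_neg hb0]
            obtain ⟨j1, hj1k, hj1LL⟩ := (bK_cases l1 l2 i k).resolve_left hb0
            have hfind : ∃ j0, (List.range k).find? (fun j => LL l1 l2 i j == bK l1 l2 i k) =
                some j0 := by
              cases hf : (List.range k).find? (fun j => LL l1 l2 i j == bK l1 l2 i k) with
              | none =>
                exfalso
                have := List.find?_eq_none.mp hf j1 (by simp [hj1k])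
                simp [hj1LL] at this
              | some j0 => exact ⟨j0, rfl⟩
            obtain ⟨j0, hj0⟩ := hfind
            rw [List.range_succ, List.find?_append, hj0]
            rfl
        have hc1 : cK l1 l2 i (k + 1) = cK l1 l2 i k := by
          unfold cK
          rw [hb1, List.range_succ, List.countP_append]
          have : ([k]).countP
              (fun j => decide (LL l1 l2 i j = bK l1 l2 i k ∧ 0 < LL l1 l2 i j)) = 0 := by
            simp only [List.countP_singleton, decide_eq_true_eq]
            rw [if_neg]
            rintro ⟨h1, h2⟩
            exact hv2 ⟨by exact_mod_cast h1, by exact_mod_cast h2⟩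
          rw [this]
          omega
        rw [hb1, hf1, hc1]

theorem aggB_eq (l1 l2 : List String) (i : Nat) :
    (PySem.List.pyRange 0 (l2.length : Int) 1).foldl
      (fun (s : Int × Int × Int) j =>
        if s.1 < PySem.List.pyGetD (rowRef l1 l2 i) j 0 then
          (PySem.List.pyGetD (rowRef l1 l2 i) j 0, j, 1)
        else if PySem.List.pyGetD (rowRef l1 l2 i) j 0 = s.1 ∧
            0 < PySem.List.pyGetD (rowRef l1 l2 i) j 0 then
          (s.1, s.2.1, s.2.2 + 1)
        else s)
      (0, -1, 0) = tripleRef l1 l2 i := by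
  rw [PySem.List.pyRange_zero_nat, List.foldl_map]
  have hgetD : ∀ j : Nat, PySem.List.pyGetD (rowRef l1 l2 i) ((j : Int)) 0 = (LL l1 l2 i j : Int) := by
    intro j
    rw [PySem.List.pyGetD_natCast]
    rcases Nat.lt_or_ge l2.length j with h | h
    · rw [List.getD_eq_getElem?_getD, List.getElem?_eq_none (by simp [rowRef]; omega)]
      unfold LL
      rw [show l2.drop j = [] from List.drop_eq_nil_of_le (by omega), lcp_nil_right]
      simp
    · exact rowRef_getD l1 l2 i j h
  have hfun : (fun (x : Int × Int × Int) (y : Nat) =>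
      if x.1 < PySem.List.pyGetD (rowRef l1 l2 i) ((y : Int)) 0 then
        (PySem.List.pyGetD (rowRef l1 l2 i) ((y : Int)) 0, (y : Int), 1)
      else if PySem.List.pyGetD (rowRef l1 l2 i) ((y : Int)) 0 = x.1 ∧
          0 < PySem.List.pyGetD (rowRef l1 l2 i) ((y : Int)) 0 then
        (x.1, x.2.1, x.2.2 + 1)
      else x) = (fun (x : Int × Int × Int) (y : Nat) =>
      if x.1 < (LL l1 l2 i y : Int) then ((LL l1 l2 i y : Int), (y : Int), 1)
      else if (LL l1 l2 i y : Int) = x.1 ∧ 0 < (LL l1 l2 i y : Int) then (x.1, x.2.1, x.2.2 + 1)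
      else x) := by
    funext x y
    rw [hgetD y]
  rw [hfun, agg_fold l1 l2 i l2.length]
  rfl

theorem rowRef_top_symm (l1 l2 : List String) :
    List.replicate (l2.length + 1) (0 : Int) = rowRef l1 l2 l1.length := by
  unfold rowRef
  have h1 : ∀ j : Nat, LL l1 l2 l1.length j = 0 := by
    intro j
    unfold LL
    rw [List.drop_length, lcp_nil_left]
  have : (List.range l2.length).map (fun j => (LL l1 l2 l1.length j : Int)) =
      List.replicate l2.length 0 := by
    rw [List.eq_replicate_iff]
    constructor
    · simp
    · intro b hb
      simp only [List.mem_map] at hb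
      obtain ⟨j, -, rfl⟩ := hb
      rw [h1 j]
      simp
  rw [this, ← List.replicate_succ']

theorem pass1_fold (l1 l2 : List String) : ∀ (k : Nat), k ≤ l1.length →
    ∀ (acc : List (Int × Int × Int)),
    (((List.range k).reverse.map (fun j => (Nat.cast j : Int))).foldl (stepB1 l1 l2)
        (acc, rowRef l1 l2 k)) =
      (acc ++ ((List.range k).reverse.map (tripleRef l1 l2)), rowRef l1 l2 0) := by
  intro k
  induction k with
  | zero => intro _ acc; simp
  | succ k ih =>
    intro hk acc
    have hrev : (List.range (k + 1)).reverse = k :: (List.range k).reverse := by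
      rw [List.range_succ, List.reverse_append]
      rfl
    rw [hrev, List.map_cons, List.foldl_cons, List.map_cons]
    have hstep : stepB1 l1 l2 (acc, rowRef l1 l2 (k + 1)) ((k : Nat) : Int) =
        (acc ++ [tripleRef l1 l2 k], rowRef l1 l2 k) := by
      unfold stepB1
      dsimp only
      rw [rowStep_eq l1 l2 k (by omega), aggB_eq l1 l2 k]
    rw [hstep, ih (by omega) (acc ++ [tripleRef l1 l2 k])]
    simp

theorem enum_map {α β : Type} (f : α → β) : ∀ (l : List α) (st : Int),
    PySem.List.enumerate (l.map f) st =
      (PySem.List.enumerate l st).map (fun p => (p.1, f p.2)) := by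
  intro l
  induction l with
  | nil => intro st; rfl
  | cons x xs ih =>
    intro st
    rw [List.map_cons, PySem.List.enumerate_cons, PySem.List.enumerate_cons, ih (st + 1),
      List.map_cons]

theorem enum_range' : ∀ (c s : Nat),
    PySem.List.enumerate (List.range' s c) ((s : Nat) : Int) =
      (List.range' s c).map (fun x : Nat => ((Nat.cast x : Int), x)) := by
  intro c
  induction c with
  | zero => intro s; rfl
  | succ c ih =>
    intro s
    rw [List.range'_succ, PySem.List.enumerate_cons, List.map_cons,
      show ((s : Int) + 1) = ((s + 1 : Nat) : Int) by push_cast; ring, ih (s + 1)]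

theorem enum_range (n : Nat) :
    PySem.List.enumerate (List.range n) =
      (List.range n).map (fun x : Nat => ((Nat.cast x : Int), x)) := by
  have := enum_range' n 0
  simpa [List.range_eq_range'] using this

theorem cntN_pos (l1 l2 : List String) (i : Nat) (h : cntN l1 l2 i = 1) : 0 < bestN l1 l2 i := by
  by_contra hc
  have hb0 : bestN l1 l2 i = 0 := by omega
  unfold cntN at h
  rw [List.countP_eq_zero.mpr] at h
  · cases h
  · intro j _
    simp only [decide_eq_true_eq, not_and]
    intro h1
    omega

theorem foldB2_sim (l1 l2 : List String) : ∀ (l : List Nat) (res : List (List Int)) (le : Nat),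
    ((l.map (fun i => (((i : Nat) : Int), tripleRef l1 l2 i))).foldl stepB2 (res, (le : Int))).1 =
      (l.foldl (refStep l1 l2) (res, le)).1 := by
  intro l
  induction l with
  | nil => intro res le; rfl
  | cons x xs ih =>
    intro res le
    rw [List.map_cons, List.foldl_cons, List.foldl_cons]
    have hstep : stepB2 (res, (le : Int)) (((x : Int)), tripleRef l1 l2 x) =
        ((refStep l1 l2 (res, le) x).1, ((refStep l1 l2 (res, le) x).2 : Int)) := by
      unfold stepB2 tripleRef refStep
      dsimp only
      have hcast : (x : Int) + (bestN l1 l2 x : Int) = ((x + bestN l1 l2 x : Nat) : Int) := by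
        push_cast; ring
      rw [hcast]
      by_cases hcond : le < x + bestN l1 l2 x
      · rw [if_pos (by exact_mod_cast hcond), if_pos hcond]
        by_cases hcnt : cntN l1 l2 x = 1
        · rw [if_pos (by exact_mod_cast hcnt), if_pos ⟨cntN_pos l1 l2 x hcnt, hcnt⟩]
        · rw [if_neg (by exact_mod_cast hcnt), if_neg (by rintro ⟨-, hcc⟩; exact hcnt hcc)]
      · rw [if_neg (by exact_mod_cast hcond), if_neg hcond]
    rw [hstep]
    have := ih (refStep l1 l2 (res, le) x).1 (refStep l1 l2 (res, le) x).2
    rw [this]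

theorem portB_eq_ref (l1num : Int) (l1 : List String) (l2num : Int) (l2 : List String) :
    process_alt l1num l1 l2num l2 = ((List.range l1.length).foldl (refStep l1 l2) ([], 0)).1 := by
  rw [processAlt_eq_fold l1num l1 l2num l2, PySem.List.pyRange_zero_nat, ← List.map_reverse,
    rowRef_top_symm l1 l2, pass1_fold l1 l2 l1.length (le_refl _) []]
  simp only [List.nil_append]
  rw [← List.map_reverse, List.reverse_reverse]
  rw [enum_map, enum_range, List.map_map, List.foldl_map]
  have := foldB2_sim l1 l2 (List.range l1.length) [] 0
  rw [List.foldl_map] at this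
  simpa using this

-- ===== VERDICT (by name: the statement is the Claim_ definition above) =====
theorem process_spec : Claim_equal_process := by
  intro l1num l1 l2num l2 _ _
  unfold Spec_process
  rw [portA_eq_ref, portB_eq_ref]
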